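-- pv_equiv track=rewrite | github.com/paiml/depyler | examples/hard_random_walk.py | walk_1d
-- ===== SOURCE A (Python) =====
-- def lcg_next(state: int) -> int:
--     """Linear congruential generator: next pseudo-random value."""
--     new_state: int = (state * 1103515245 + 12345) % 2147483648
--     return new_state
--
-- def walk_1d(steps: int, seed: int) -> list[int]:
--     """Simulate a 1D random walk for given steps using LCG."""
--     positions: list[int] = [0]
--     state: int = seed
--     pos: int = 0
--     i: int = 0
--     while i < steps:
--         state = lcg_next(state)
--         direction: int = state % 2
--         if direction == 0:
--             pos = pos - 1
--         else:
--             pos = pos + 1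
--         positions.append(pos)
--         i = i + 1
--     return positions
-- ===== SOURCE B (Python) =====
-- def _lcg(s: int) -> int:
--     return (s * 1103515245 + 12345) % 2147483648
--
-- def walk_1d(steps: int, seed: int) -> list[int]:
--     # Pass 1: generate the +/-1 step sequence from the LCG.
--     dirs: list[int] = []
--     s = seed
--     for _ in range(steps):
--         s = _lcg(s)
--         dirs.append(-1 if s % 2 == 0 else 1)
--     # Pass 2: cumulative sum starting at 0.
--     positions: list[int] = [0]
--     total = 0
--     for d in dirs:
--         total += d
--         positions.append(total)
--     return positions
-- ===== Notes on version B (the rewrite author's own statement) =====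
-- stated objective: alternative
-- what changed: Splits the fused while-loop into two passes: first generate the list of +/-1 directions from the LCG, then compute positions as a running cumulative sum.
import Mathlib
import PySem

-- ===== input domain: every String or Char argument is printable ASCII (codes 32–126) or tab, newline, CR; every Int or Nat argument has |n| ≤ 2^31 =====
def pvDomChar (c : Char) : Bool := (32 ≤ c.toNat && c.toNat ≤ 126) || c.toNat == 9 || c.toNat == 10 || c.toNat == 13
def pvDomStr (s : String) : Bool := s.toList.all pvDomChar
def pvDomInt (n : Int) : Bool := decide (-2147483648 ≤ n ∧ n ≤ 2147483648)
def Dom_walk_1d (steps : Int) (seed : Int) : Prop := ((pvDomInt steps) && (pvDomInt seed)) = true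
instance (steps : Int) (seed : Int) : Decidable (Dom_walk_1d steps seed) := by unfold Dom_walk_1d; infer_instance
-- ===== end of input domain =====

-- B splits A's fused walk loop into two passes (direction generation, then cumulative sum); same O(n) cost.


-- ===== PORT A =====
def lcg_next (state : Int) : Int := PySem.Int.mod (state * 1103515245 + 12345) 2147483648

-- the 'while i < steps' loop: fuel = number of remaining iterations, positions built by append
def walkLoopA : Nat → Int → Int → List Int → List Int
  | 0, _, _, positions => positions
  | n + 1, state, pos, positions =>
    let state' := lcg_next state
    let direction := PySem.Int.mod state' 2
    let pos' := if direction == 0 then pos - 1 else pos + 1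
    walkLoopA n state' pos' (positions ++ [pos'])

def walk_1d (steps : Int) (seed : Int) : List Int :=
  walkLoopA steps.toNat seed 0 [0]

-- ===== PORT B =====
def lcgB (s : Int) : Int := PySem.Int.mod (s * 1103515245 + 12345) 2147483648

-- pass 1: the list of +/-1 directions produced by the next n LCG states
def dirsB : Nat → Int → List Int
  | 0, _ => []
  | n + 1, s =>
    let s' := lcgB s
    (if PySem.Int.mod s' 2 == 0 then (-1 : Int) else 1) :: dirsB n s'

-- pass 2: running cumulative sum
def accumB : Int → List Int → List Int
  | _, [] => []
  | total, d :: ds => (total + d) :: accumB (total + d) ds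

def walk_1d_alt (steps : Int) (seed : Int) : List Int :=
  0 :: accumB 0 (dirsB steps.toNat seed)

-- ===== PRECONDITION & SPEC =====
def Spec_walk_1d (steps : Int) (seed : Int) (out : List Int) : Prop := out = walk_1d_alt steps seed
instance (steps : Int) (seed : Int) (out : List Int) : Decidable (Spec_walk_1d steps seed out) := by unfold Spec_walk_1d; infer_instance

-- ===== CLAIM (what is proved, stated in full; the proofs are below) =====
def Claim_equal_walk_1d : Prop := ∀ (steps : Int) (seed : Int), Dom_walk_1d steps seed → Spec_walk_1d steps seed (walk_1d steps seed)

-- ===== LEMMAS AND PROOFS =====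
theorem walkLoopA_eq (n : Nat) : ∀ (state pos : Int) (acc : List Int),
    walkLoopA n state pos acc = acc ++ accumB pos (dirsB n state) := by
  induction n with
  | zero => intro state pos acc; simp [walkLoopA, dirsB, accumB]
  | succ n ih =>
    intro state pos acc
    simp only [walkLoopA, dirsB, accumB, ih, List.append_assoc, List.cons_append, List.nil_append,
      lcg_next, lcgB, PySem.Int.mod, beq_iff_eq]
    split_ifs <;> simp <;> constructor <;> ring

-- ===== VERDICT (by name: the statement is the Claim_ definition above) =====
theorem walk_1d_spec : Claim_equal_walk_1d := by
  intro steps seed _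
  unfold Spec_walk_1d walk_1d walk_1d_alt
  simp [walkLoopA_eq]
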